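-- pv_equiv track=rewrite | github.com/usharma123/Packet28 | benchmarks/packet28_search_tool_benchmark.py | render_compact_preview
-- ===== SOURCE A (Python) =====
-- def render_compact_preview(found: list[str]) -> str:
--     if not found:
--         return "Search found 0 matches."
--     per_path: dict[str, int] = {}
--     for hit in found:
--         path, _line = hit.split(":", 1)
--         per_path[path] = per_path.get(path, 0) + 1
--     lines = [f"Search found {len(found)} matches in {len(per_path)} files."]
--     for path in sorted(per_path):
--         lines.append(f"- {path} ({per_path[path]})")
--     return "\n".join(lines)
-- ===== SOURCE B (Python) =====
-- def render_compact_preview(found: list[str]) -> str: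
--     if not found:
--         return "Search found 0 matches."
--     paths = []
--     for hit in found:
--         path, _line = hit.split(":", 1)
--         paths.append(path)
--     paths.sort()
--     groups = []
--     prev, cnt = paths[0], 0
--     for p in paths:
--         if p == prev:
--             cnt += 1
--         else:
--             groups.append(f"- {prev} ({cnt})")
--             prev, cnt = p, 1
--     groups.append(f"- {prev} ({cnt})")
--     header = f"Search found {len(found)} matches in {len(groups)} files."
--     return "\n".join([header] + groups)
-- ===== Notes on version B (the rewrite author's own statement) =====
-- stated objective: alternative
-- what changed: Replaces the path-count dict plus sort-of-keys with extract-all-paths, sort the whole path list, then one scan counting consecutive runs.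
-- outside the precondition, e.g. on render_compact_preview(['nocolon']): A raises ValueError, B raises ValueError
import Mathlib
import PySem

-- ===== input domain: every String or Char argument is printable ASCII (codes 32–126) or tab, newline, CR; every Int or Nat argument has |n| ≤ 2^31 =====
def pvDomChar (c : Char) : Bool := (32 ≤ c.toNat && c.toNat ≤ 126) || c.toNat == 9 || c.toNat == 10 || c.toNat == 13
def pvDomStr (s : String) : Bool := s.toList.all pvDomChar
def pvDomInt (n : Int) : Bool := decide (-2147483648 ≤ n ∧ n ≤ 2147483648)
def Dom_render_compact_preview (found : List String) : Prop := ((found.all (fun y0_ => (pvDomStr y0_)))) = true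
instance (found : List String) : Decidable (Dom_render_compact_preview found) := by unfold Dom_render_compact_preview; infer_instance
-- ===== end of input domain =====

-- B replaces A's per-path counting dict + sorted(keys) by sort-all-paths then one run-counting scan (objective: alternative).

-- shared by both ports: the `path` of `path, _line = hit.split(":", 1)` (both Pythons extract it identically; under Pre_ the split has exactly 2 parts)
def pvPath (hit : String) : String := (((PySem.Str.splitMax? hit ":" 1).getD []).headD "")
def pvFmt (p : String) (n : Int) : String := "- " ++ p ++ " (" ++ PySem.Int.toStr n ++ ")"

def render_compact_preview (found : List String) : String :=
  if found = [] then "Search found 0 matches."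
  else
    let per_path : PySem.Dict String Int :=
      found.foldl (fun d hit => d.insert (pvPath hit) (d.getD (pvPath hit) 0 + 1)) PySem.Dict.empty
    let lines : List String :=
      ["Search found " ++ PySem.Int.toStr (PySem.List.len found) ++ " matches in "
        ++ PySem.Int.toStr (per_path.size : Int) ++ " files."]
    let lines := (PySem.List.sorted per_path.keys (fun x => x) false).foldl
      (fun acc path => acc ++ [pvFmt path (per_path.getD path 0)]) lines
    PySem.Str.join "\n" lines

def render_compact_preview_alt (found : List String) : String :=
  if found = [] then "Search found 0 matches."
  else
    let paths : List String := found.foldl (fun acc hit => acc ++ [pvPath hit]) []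
    let paths := PySem.List.sorted paths (fun x => x) false
    let st := paths.foldl
      (fun (st : List String × String × Int) p =>
        if p = st.2.1 then (st.1, st.2.1, st.2.2 + 1)
        else (st.1 ++ [pvFmt st.2.1 st.2.2], p, 1))
      ([], paths.headD "", 0)
    let groups := st.1 ++ [pvFmt st.2.1 st.2.2]
    let header := "Search found " ++ PySem.Int.toStr (PySem.List.len found) ++ " matches in "
      ++ PySem.Int.toStr (PySem.List.len groups) ++ " files."
    PySem.Str.join "\n" (header :: groups)

-- ===== PRECONDITION & SPEC =====
-- Pre_ excludes exactly the hits without a ':', on which Python A (and B alike) raises ValueError at the tuple unpacking.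
def Pre_render_compact_preview (found : List String) : Prop :=
  ∀ hit ∈ found, PySem.Str.isIn ":" hit = true
instance (found : List String) : Decidable (Pre_render_compact_preview found) := by
  unfold Pre_render_compact_preview; infer_instance
def pvWitness_render_compact_preview : List String := ["a.py:1", "b.py:2", "a.py:3"]

def Spec_render_compact_preview (found : List String) (out : String) : Prop := out = render_compact_preview_alt found
instance (found : List String) (out : String) : Decidable (Spec_render_compact_preview found out) := by unfold Spec_render_compact_preview; infer_instance

-- ===== CLAIM (what is proved, stated in full; the proofs are below) =====
def Claim_equal_render_compact_preview : Prop := ∀ (found : List String), Dom_render_compact_preview found → Pre_render_compact_preview found → Spec_render_compact_preview found (render_compact_preview found)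

-- ===== LEMMAS AND PROOFS =====

def pvDD : List String → List String
  | [] => []
  | a :: l => a :: pvDD (l.filter (fun x => x ≠ a))
termination_by l => l.length
decreasing_by
  simp only [List.length_unattach]
  exact Nat.lt_succ_of_le (by
    simpa using List.length_filter_le (fun x => decide ((x : {x // x ∈ l}).1 ≠ a)) l.attach)

def pvG : List String → List String
  | [] => []
  | a :: l => pvFmt a (1 + (l.count a : Int)) :: pvG (l.filter (fun x => x ≠ a))
termination_by l => l.length
decreasing_by
  simp only [List.length_unattach]
  exact Nat.lt_succ_of_le (by
    simpa using List.length_filter_le (fun x => decide ((x : {x // x ∈ l}).1 ≠ a)) l.attach)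

def pvRuns : String → Int → List String → List String
  | prev, cnt, [] => [pvFmt prev cnt]
  | prev, cnt, p :: rest =>
    if p = prev then pvRuns prev (cnt + 1) rest else pvFmt prev cnt :: pvRuns p 1 rest

theorem pv_foldB (l : List String) (gs : List String) (prev : String) (cnt : Int) :
    (l.foldl
      (fun (st : List String × String × Int) p =>
        if p = st.2.1 then (st.1, st.2.1, st.2.2 + 1)
        else (st.1 ++ [pvFmt st.2.1 st.2.2], p, 1)) (gs, prev, cnt)).1
      ++ [pvFmt (l.foldl
      (fun (st : List String × String × Int) p =>
        if p = st.2.1 then (st.1, st.2.1, st.2.2 + 1)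
        else (st.1 ++ [pvFmt st.2.1 st.2.2], p, 1)) (gs, prev, cnt)).2.1
        (l.foldl
      (fun (st : List String × String × Int) p =>
        if p = st.2.1 then (st.1, st.2.1, st.2.2 + 1)
        else (st.1 ++ [pvFmt st.2.1 st.2.2], p, 1)) (gs, prev, cnt)).2.2]
      = gs ++ pvRuns prev cnt l := by
  induction l generalizing gs prev cnt with
  | nil => simp [pvRuns]
  | cons p rest ih =>
    by_cases h : p = prev
    · simp only [List.foldl_cons, h, pvRuns, ite_true]
      rw [ih]
    · simp only [List.foldl_cons, if_neg h, pvRuns]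
      rw [ih]
      simp

theorem pv_runs_eq_G (l : List String) (prev : String) (cnt : Int)
    (hs : l.Pairwise (· ≤ ·)) (hlb : ∀ x ∈ l, prev ≤ x) :
    pvRuns prev cnt l = pvFmt prev (cnt + (l.count prev : Int)) :: pvG (l.filter (fun x => x ≠ prev)) := by
  induction l generalizing prev cnt with
  | nil => simp [pvRuns, pvG]
  | cons p rest ih =>
    rcases List.pairwise_cons.1 hs with ⟨hp, hrest⟩
    by_cases h : p = prev
    · subst h
      rw [pvRuns, if_pos rfl, ih p (cnt + 1) hrest hp]
      simp only [List.count_cons_self, List.filter_cons]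
      simp only [ne_eq, not_true_eq_false, decide_false]
      congr 1
      unfold pvFmt
      congr 2
      push_cast
      ring_nf
    · have hlt : prev < p := lt_of_le_of_ne (hlb p (List.mem_cons_self)) (Ne.symm h)
      have hnm : ∀ x ∈ rest, x ≠ prev := fun x hx => ne_of_gt (lt_of_lt_of_le hlt (hp x hx))
      rw [pvRuns, if_neg h, ih p 1 hrest hp]
      have hc : (p :: rest).count prev = 0 := by
        rw [List.count_eq_zero]
        simp only [List.mem_cons]
        rintro (rfl | hx)
        · exact h rfl
        · exact hnm _ hx rfl
      have hf : (p :: rest).filter (fun x => x ≠ prev) = p :: rest := by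
        rw [List.filter_eq_self]
        intro x hx
        rcases List.mem_cons.1 hx with rfl | hx
        · simpa using h
        · simpa using hnm x hx
      rw [hc, hf]
      simp [pvG]

theorem pv_ind (P : List String → Prop) (h0 : P [])
    (h1 : ∀ a l, P (l.filter (fun x => x ≠ a)) → P (a :: l)) : ∀ l, P l := by
  intro l
  induction hn : l.length using Nat.strong_induction_on generalizing l with
  | _ n ih =>
    cases l with
    | nil => exact h0
    | cons a t =>
      refine h1 a t (ih (t.filter (fun x => x ≠ a)).length ?_ _ rfl)
      subst hn
      simp only [List.length_cons]
      exact Nat.lt_succ_of_le (List.length_filter_le _ _)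

theorem pvDD_mem (l : List String) : ∀ x, (x ∈ pvDD l ↔ x ∈ l) := by
  induction l using pv_ind with
  | h0 => simp [pvDD]
  | h1 a l ih =>
    intro x
    rw [pvDD]
    simp only [List.mem_cons, ih, List.mem_filter]
    constructor
    · rintro (rfl | ⟨h, _⟩)
      · exact Or.inl rfl
      · exact Or.inr h
    · rintro (rfl | h)
      · exact Or.inl rfl
      · by_cases hx : x = a
        · exact Or.inl hx
        · exact Or.inr ⟨h, by simpa using hx⟩

theorem pvDD_nodup (l : List String) : (pvDD l).Nodup := by
  induction l using pv_ind with
  | h0 => simp [pvDD]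
  | h1 a l ih =>
    rw [pvDD, List.nodup_cons]
    refine ⟨fun h => ?_, ih⟩
    have := (pvDD_mem _ a).1 h
    simp at this

theorem pvDD_sublist (l : List String) : List.Sublist (pvDD l) l := by
  induction l using pv_ind with
  | h0 => simp [pvDD]
  | h1 a l ih =>
    rw [pvDD]
    exact List.Sublist.cons₂ a (ih.trans List.filter_sublist)

theorem pvG_eq_map (l : List String) :
    pvG l = (pvDD l).map (fun p => pvFmt p (l.count p : Int)) := by
  induction l using pv_ind with
  | h0 => simp [pvG, pvDD]
  | h1 a l ih =>
    rw [pvG, pvDD, List.map_cons, ih]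
    congr 1
    · unfold pvFmt
      congr 2
      simp [List.count_cons_self]
      congr 1
      omega
    · apply List.map_congr_left
      intro x hx
      have hxl := (pvDD_mem _ x).1 hx
      have hxa : x ≠ a := by
        rcases List.mem_filter.1 hxl with ⟨_, h⟩
        simpa using h
      congr 1
      rw [List.count_filter (by simpa using hxa)]
      simp [Ne.symm hxa]

theorem pvDD_sorted_eq (ps : List String) :
    pvDD (PySem.List.sorted ps (fun x => x) false)
      = PySem.List.sorted (PySem.Set.ofList ps) (fun x => x) false := by
  apply Eq.symm
  apply PySem.List.sorted_eq_of_perm_of_pairwise_lt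
  · rw [List.perm_ext_iff_of_nodup (pvDD_nodup _) (PySem.Set.nodup_ofList ps)]
    intro x
    rw [pvDD_mem, PySem.Set.mem_ofList, PySem.List.mem_sorted]
  · have hle : (pvDD (PySem.List.sorted ps (fun x => x) false)).Pairwise (· ≤ ·) :=
      (PySem.List.sorted_pairwise ps (fun x => x)).sublist (pvDD_sublist _)
    have hne : (pvDD (PySem.List.sorted ps (fun x => x) false)).Pairwise (· ≠ ·) :=
      pvDD_nodup _
    exact (hle.and hne).imp (fun h => lt_of_le_of_ne h.1 h.2)

theorem pv_runs_sorted (ps : List String) (hne : ps ≠ []) :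
    [] ++ pvRuns ((PySem.List.sorted ps (fun x => x) false).headD "") 0
        (PySem.List.sorted ps (fun x => x) false)
      = pvG (PySem.List.sorted ps (fun x => x) false) := by
  have hp := PySem.List.sorted_pairwise ps (fun x => x)
  cases hsp : PySem.List.sorted ps (fun x => x) false with
  | nil => exact absurd (by rwa [PySem.List.sorted_eq_nil_iff] at hsp) hne
  | cons h t =>
    rw [hsp] at hp
    rcases List.pairwise_cons.1 hp with ⟨hh, ht⟩
    simp only [List.headD_cons, List.nil_append]
    rw [pvRuns, if_pos rfl, pv_runs_eq_G t h (0 + 1) ht hh]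
    conv_rhs => rw [pvG]
    norm_num

theorem pv_ports_eq (found : List String) :
    render_compact_preview found = render_compact_preview_alt found := by
  unfold render_compact_preview render_compact_preview_alt
  by_cases hnil : found = []
  · simp [hnil]
  · rw [if_neg hnil, if_neg hnil]
    simp only [PySem.List.foldl_append_singleton_eq_map, List.nil_append]
    rw [show (found.foldl (fun d hit => d.insert (pvPath hit) (d.getD (pvPath hit) 0 + 1)) PySem.Dict.empty)
          = PySem.Dict.counter (found.map pvPath) by
        rw [← PySem.Dict.foldl_insert_getD_add_one_eq_counter, List.foldl_map]]
    simp only [PySem.Dict.keys_counter, PySem.Dict.getD_counter]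
    rw [pv_foldB, pv_runs_sorted _ (by simpa using hnil), pvG_eq_map, pvDD_sorted_eq]
    simp only [(PySem.List.sorted_perm (List.map pvPath found) (fun x => x) false).count_eq]
    simp only [PySem.List.len_eq, List.length_map, PySem.List.length_sorted]
    rw [show (PySem.Dict.counter (List.map pvPath found)).size
          = (PySem.Set.ofList (List.map pvPath found)).length from by
        simp [PySem.Dict.size, PySem.Dict.items_counter]]
    simp

-- ===== VERDICT (by name: the statement is the Claim_ definition above) =====
theorem render_compact_preview_spec : Claim_equal_render_compact_preview := by
  intro found _hdom _hpre
  exact pv_ports_eq found
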